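-- pv_equiv track=rewrite | github.com/spinerak/PicrossAP | generateRandomPicross2.py | get_clues_from_grid
-- ===== SOURCE A (Python) =====
-- def get_clues_from_grid(grid):
--     x = len(grid[0])
--     y = len(grid)
--     # Function to calculate clues for a single line (row or column)
--     def calculate_clues(line):
--         clues = []
--         count = 0
--         for cell in line:
--             if cell == 1:
--                 count += 1
--             else:
--                 if count > 0:
--                     clues.append(count)
--                     count = 0
--         if count > 0:
--             clues.append(count)
--         return clues if clues else []
--
--     # Calculate row clues
--     row_clues = [calculate_clues(row) for row in grid]
--
--     # Calculate column clues
--     column_clues = [calculate_clues([grid[row][col] for row in range(y)]) for col in range(x)]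
--
--     return [row_clues, column_clues]
-- ===== SOURCE B (Python) =====
-- def get_clues_from_grid(grid):
--     # Boundary method: classify each cell independently as a run start / run end
--     # (no sequential run scan or counter), then pair starts with ends;
--     # columns are built by transposing with zip(*grid).
--     def clues(line):
--         n = len(line)
--         starts = [i for i in range(n) if line[i] == 1 and (i == 0 or line[i - 1] != 1)]
--         ends = [i for i in range(n) if line[i] == 1 and (i == n - 1 or line[i + 1] != 1)]
--         return [e - s + 1 for s, e in zip(starts, ends)]
--     return [[clues(row) for row in grid], [clues(list(col)) for col in zip(*grid)]]
-- ===== Notes on version B (the rewrite author's own statement) =====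
-- stated objective: alternative
-- what changed: Instead of A's sequential counter-and-flush scan, B classifies every cell independently as a run start (1 with no 1 before it) or run end (1 with no 1 after it), pairs the start list with the end list via zip and emits end-start+1; columns come from zip(*grid) instead of nested index comprehensions.
import Mathlib
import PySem

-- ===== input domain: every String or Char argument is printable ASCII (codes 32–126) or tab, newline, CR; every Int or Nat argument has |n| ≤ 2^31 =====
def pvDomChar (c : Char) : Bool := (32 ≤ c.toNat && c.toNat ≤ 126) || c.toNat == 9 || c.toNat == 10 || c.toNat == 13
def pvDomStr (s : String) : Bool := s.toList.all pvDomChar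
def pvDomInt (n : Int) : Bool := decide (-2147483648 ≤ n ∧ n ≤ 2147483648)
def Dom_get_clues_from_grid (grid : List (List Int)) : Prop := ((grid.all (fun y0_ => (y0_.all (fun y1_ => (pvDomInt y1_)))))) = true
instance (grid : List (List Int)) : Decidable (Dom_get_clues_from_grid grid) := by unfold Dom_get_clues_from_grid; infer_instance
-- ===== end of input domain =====

-- B computes each line's clues by classifying every cell independently as a run start
-- (a 1 with no 1 before it) or a run end (a 1 with no 1 after it) and zipping the two
-- boundary lists into end-start+1 lengths — no sequential counter state like A — and
-- builds columns by a zip-style transpose instead of A's nested index comprehensions;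
-- objective: alternative, same cost.

-- ===== PORT A =====
-- calculate_clues: foldl with state (clues, count), then the final flush
def pvCalcClues (line : List Int) : List Int :=
  let s := line.foldl (fun (st : List Int × Int) cell =>
    if cell = 1 then (st.1, st.2 + 1)
    else if st.2 > 0 then (st.1 ++ [st.2], 0) else st) ([], 0)
  if s.2 > 0 then s.1 ++ [s.2] else s.1

def get_clues_from_grid (grid : List (List Int)) : List (List (List Int)) :=
  let x : Nat := ((PySem.List.pyGet? grid 0).getD []).length
  let y : Nat := grid.length
  let row_clues := grid.map (fun row => pvCalcClues row)
  let column_clues := (PySem.List.pyRange 0 x 1).map (fun col =>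
    pvCalcClues ((PySem.List.pyRange 0 y 1).map (fun row =>
      PySem.List.pyGetD (PySem.List.pyGetD grid row []) col 0)))
  [row_clues, column_clues]

-- ===== PORT B =====
-- starts = [i for i in range(n) if line[i] == 1 and (i == 0 or line[i-1] != 1)]
def pvStartsB (xs : List Int) : List Nat :=
  (List.range xs.length).filter
    (fun i => decide (xs.getD i 0 = 1 ∧ (i = 0 ∨ xs.getD (i - 1) 0 ≠ 1)))

-- ends = [i for i in range(n) if line[i] == 1 and (i == n-1 or line[i+1] != 1)]
def pvEndsB (xs : List Int) : List Nat :=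
  (List.range xs.length).filter
    (fun i => decide (xs.getD i 0 = 1 ∧ (i = xs.length - 1 ∨ xs.getD (i + 1) 0 ≠ 1)))

-- [e - s + 1 for s, e in zip(starts, ends)]
def pvZipF (a b : List Nat) : List Int :=
  (a.zip b).map (fun p => (p.2 : Int) - (p.1 : Int) + 1)

def pvCluesB (xs : List Int) : List Int := pvZipF (pvStartsB xs) (pvEndsB xs)

-- zip(*grid): truncating transpose
def pvZipStar (rows : List (List Int)) : List (List Int) :=
  if _h : rows.isEmpty ∨ rows.any (·.isEmpty) then []
  else (rows.map (fun r => r.headD 0)) :: pvZipStar (rows.map (fun r => r.tail))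
termination_by ((rows.headD []).length)
decreasing_by
  rw [not_or] at _h
  obtain ⟨h1, h2⟩ := _h
  match rows, h1, h2 with
  | r :: rs, h1, h2 =>
    have hr : r ≠ [] := by
      intro hre
      exact h2 (by simp [hre])
    match r, hr with
    | a :: t, _ => simp

def get_clues_from_grid_alt (grid : List (List Int)) : List (List (List Int)) :=
  [grid.map (fun row => pvCluesB row),
   (pvZipStar grid).map (fun col => pvCluesB col)]

-- ===== PRECONDITION & SPEC =====
-- Pre_ excludes exactly the inputs on which A raises IndexError: the empty grid (grid[0])
-- and ragged grids with a row shorter than row 0 (grid[row][col]).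
def Pre_get_clues_from_grid (grid : List (List Int)) : Prop :=
  grid ≠ [] ∧ ∀ r ∈ grid, (grid.headD []).length ≤ r.length
instance (grid : List (List Int)) : Decidable (Pre_get_clues_from_grid grid) := by
  unfold Pre_get_clues_from_grid; infer_instance

def pvWitness_get_clues_from_grid : List (List Int) := [[1, 1, 0], [0, 1, 2]]

def Spec_get_clues_from_grid (grid : List (List Int)) (out : List (List (List Int))) : Prop := out = get_clues_from_grid_alt grid
instance (grid : List (List Int)) (out : List (List (List Int))) : Decidable (Spec_get_clues_from_grid grid out) := by unfold Spec_get_clues_from_grid; infer_instance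

-- ===== CLAIM (what is proved, stated in full; the proofs are below) =====
def Claim_equal_get_clues_from_grid : Prop := ∀ (grid : List (List Int)), Dom_get_clues_from_grid grid → Pre_get_clues_from_grid grid → Spec_get_clues_from_grid grid (get_clues_from_grid grid)

-- ===== LEMMAS AND PROOFS =====

-- canonical recursive clue function mediating between A's foldl and B's boundary zip
def pvG (count : Int) : List Int → List Int
  | [] => if count > 0 then [count] else []
  | c :: t => if c = 1 then pvG (count + 1) t
              else if count > 0 then count :: pvG 0 t else pvG 0 t

theorem pvFoldA (xs : List Int) : ∀ (acc : List Int) (count : Int), 0 ≤ count →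
    (let s := xs.foldl (fun (st : List Int × Int) cell =>
      if cell = 1 then (st.1, st.2 + 1)
      else if st.2 > 0 then (st.1 ++ [st.2], 0) else st) (acc, count);
     if s.2 > 0 then s.1 ++ [s.2] else s.1) = acc ++ pvG count xs := by
  induction xs with
  | nil =>
    intro acc count _
    simp only [List.foldl_nil, pvG]
    split_ifs <;> simp
  | cons c t ih =>
    intro acc count h
    simp only [List.foldl_cons, pvG]
    by_cases hc : c = 1
    · simp only [hc, if_true]
      have := ih acc (count + 1) (by omega)
      simpa using this
    · simp only [if_neg hc]
      by_cases hcnt : count > 0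
      · simp only [if_pos hcnt]
        have := ih (acc ++ [count]) 0 le_rfl
        simpa using this
      · simp only [if_neg hcnt]
        have hc0 : count = 0 := by omega
        subst hc0
        have := ih acc 0 le_rfl
        simpa using this

theorem pvCalc_eq_g (xs : List Int) : pvCalcClues xs = pvG 0 xs := by
  have := pvFoldA xs [] 0 le_rfl
  simpa [pvCalcClues] using this

-- B-side: the start filter with the "previous cell" at index 0 generalized to a parameter
def pvSfil (prev : Int) (xs : List Int) : List Nat :=
  (List.range xs.length).filter
    (fun i => decide (xs.getD i 0 = 1 ∧ (if i = 0 then prev ≠ 1 else xs.getD (i - 1) 0 ≠ 1)))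

theorem pvStartsB_eq_sfil (xs : List Int) : pvStartsB xs = pvSfil 0 xs := by
  unfold pvStartsB pvSfil
  apply List.filter_congr
  intro i _
  by_cases hi : i = 0 <;> simp [hi]

-- generic shape of a range-filter over a cons: head test, then the shifted filter
theorem pvFilterRangeSucc (n : Nat) (p q : Nat → Bool)
    (hpq : ∀ i, i < n → p (i + 1) = q i) :
    (List.range (n + 1)).filter p
      = (if p 0 then [0] else []) ++ ((List.range n).filter q).map (· + 1) := by
  have hfl : (List.range n).filter (p ∘ Nat.succ) = (List.range n).filter q := by
    apply List.filter_congr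
    intro i hi
    exact hpq i (List.mem_range.mp hi)
  have hmap : List.map Nat.succ ((List.range n).filter q)
      = ((List.range n).filter q).map (· + 1) :=
    List.map_congr_left (fun a _ => rfl)
  rw [List.range_succ_eq_map, List.filter_cons, List.filter_map, hfl, hmap]
  by_cases h : p 0 <;> simp [h]

theorem pvSfil_cons (prev c : Int) (t : List Int) :
    pvSfil prev (c :: t) =
      (if c = 1 ∧ prev ≠ 1 then [0] else []) ++ (pvSfil c t).map (· + 1) := by
  have hq : ∀ i, i < t.length →
      (fun i => decide ((c :: t).getD i 0 = 1 ∧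
        (if i = 0 then prev ≠ 1 else (c :: t).getD (i - 1) 0 ≠ 1))) (i + 1)
      = (fun i => decide (t.getD i 0 = 1 ∧
        (if i = 0 then c ≠ 1 else t.getD (i - 1) 0 ≠ 1))) i := by
    intro i _
    cases i with
    | zero => simp
    | succ j => simp
  unfold pvSfil
  rw [List.length_cons, pvFilterRangeSucc t.length _ _ hq]
  congr 1
  have hhead : (decide ((c :: t).getD 0 0 = 1 ∧
      (if (0 : Nat) = 0 then prev ≠ 1 else (c :: t).getD (0 - 1) 0 ≠ 1)) = true)
      ↔ (c = 1 ∧ prev ≠ 1) := by simp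
  exact if_congr hhead rfl rfl

theorem pvEndsB_cons (c : Int) (t : List Int) :
    pvEndsB (c :: t) =
      (if c = 1 ∧ (t = [] ∨ t.getD 0 0 ≠ 1) then [0] else []) ++ (pvEndsB t).map (· + 1) := by
  have hq : ∀ i, i < t.length →
      (fun i => decide ((c :: t).getD i 0 = 1 ∧
        (i = t.length + 1 - 1 ∨ (c :: t).getD (i + 1) 0 ≠ 1))) (i + 1)
      = (fun i => decide (t.getD i 0 = 1 ∧
        (i = t.length - 1 ∨ t.getD (i + 1) 0 ≠ 1))) i := by
    intro i hi
    simp only [List.getD_cons_succ]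
    rw [decide_eq_decide]
    constructor
    · rintro ⟨h1, h2 | h2⟩
      · exact ⟨h1, Or.inl (by omega)⟩
      · exact ⟨h1, Or.inr h2⟩
    · rintro ⟨h1, h2 | h2⟩
      · exact ⟨h1, Or.inl (by omega)⟩
      · exact ⟨h1, Or.inr h2⟩
  unfold pvEndsB
  rw [show (c :: t).length = t.length + 1 from rfl,
      pvFilterRangeSucc t.length
        (fun i => decide ((c :: t).getD i 0 = 1 ∧
          (i = t.length + 1 - 1 ∨ (c :: t).getD (i + 1) 0 ≠ 1)))
        (fun i => decide (t.getD i 0 = 1 ∧ (i = t.length - 1 ∨ t.getD (i + 1) 0 ≠ 1)))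
        hq]
  congr 1
  have hhead : (decide ((c :: t).getD 0 0 = 1 ∧
      ((0 : Nat) = t.length + 1 - 1 ∨ (c :: t).getD (0 + 1) 0 ≠ 1)) = true)
      ↔ (c = 1 ∧ (t = [] ∨ t.getD 0 0 ≠ 1)) := by
    simp only [decide_eq_true_eq, List.getD_cons_zero, List.getD_cons_succ,
      Nat.add_sub_cancel]
    constructor
    · rintro ⟨h1, h2 | h2⟩
      · exact ⟨h1, Or.inl (List.length_eq_zero_iff.mp h2.symm)⟩
      · exact ⟨h1, Or.inr h2⟩
    · rintro ⟨h1, h2 | h2⟩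
      · subst h2; exact ⟨h1, Or.inl rfl⟩
      · exact ⟨h1, Or.inr h2⟩
  exact if_congr hhead rfl rfl

-- when the line does not begin with a 1, the "previous cell" parameter is irrelevant
theorem pvSfil_irrel (p q : Int) (xs : List Int) (h : xs.getD 0 0 ≠ 1) :
    pvSfil p xs = pvSfil q xs := by
  unfold pvSfil
  apply List.filter_congr
  intro i _
  by_cases hi : i = 0
  · subst hi
    simp only [List.getD] at h
    simp [h]
  · simp [hi]

theorem pvSfil_rep_one (k : Nat) (r : List Int) :
    pvSfil 1 (List.replicate k 1 ++ r) = (pvSfil 1 r).map (· + k) := by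
  induction k with
  | zero => simp
  | succ m ih =>
    rw [List.replicate_succ, List.cons_append, pvSfil_cons, ih]
    rw [if_neg (by simp), List.nil_append, List.map_map]
    all_goals
      apply List.map_congr_left
      intro i _
      simp only [Function.comp_apply]
      omega

theorem pvSfil_start (prev : Int) (k : Nat) (r : List Int)
    (hp : prev ≠ 1) (hk : 1 ≤ k) :
    pvSfil prev (List.replicate k 1 ++ r) = 0 :: (pvSfil 1 r).map (· + k) := by
  obtain ⟨m, rfl⟩ : ∃ m, k = m + 1 := ⟨k - 1, by omega⟩
  rw [List.replicate_succ, List.cons_append, pvSfil_cons, pvSfil_rep_one]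
  rw [if_pos ⟨rfl, hp⟩, List.map_map]
  simp only [List.cons_append, List.nil_append]
  congr 1

theorem pvEndsB_rep (k : Nat) (r : List Int) (hr : r.getD 0 0 ≠ 1) (hk : 1 ≤ k) :
    pvEndsB (List.replicate k 1 ++ r) = (k - 1) :: (pvEndsB r).map (· + k) := by
  induction k with
  | zero => omega
  | succ m ih =>
    rw [List.replicate_succ, List.cons_append, pvEndsB_cons]
    by_cases hm : m = 0
    · subst hm
      rw [if_pos]
      · simp
      · refine ⟨rfl, ?_⟩
        cases r with
        | nil => exact Or.inl rfl
        | cons a t => exact Or.inr (by simpa using hr)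
    · rw [ih (by omega), if_neg]
      · rw [List.nil_append, List.map_cons, List.map_map]
        congr 1
        all_goals omega
      · rintro ⟨-, h2 | h2⟩
        · cases m with
          | zero => exact hm rfl
          | succ m' => simp [List.replicate_succ] at h2
        · cases m with
          | zero => exact hm rfl
          | succ m' => simp [List.replicate_succ] at h2

theorem pvG_rep (k : Nat) : ∀ (count : Int) (r : List Int),
    pvG count (List.replicate k 1 ++ r) = pvG (count + k) r := by
  induction k with
  | zero => intro count r; simp
  | succ m ih =>
    intro count r
    rw [List.replicate_succ, List.cons_append]
    show pvG count (1 :: (List.replicate m 1 ++ r)) = _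
    rw [pvG, if_pos rfl, ih]
    congr 1
    push_cast
    ring

theorem pvZipF_shift (a b : List Nat) (k : Nat) :
    pvZipF (a.map (· + k)) (b.map (· + k)) = pvZipF a b := by
  unfold pvZipF
  rw [List.zip_map, List.map_map]
  apply List.map_congr_left
  intro p _
  simp only [Function.comp_apply, Prod.map]
  push_cast
  ring

theorem pvDropWhile_head (xs : List Int) :
    (xs.dropWhile (fun x => decide (x = 1))).getD 0 0 ≠ 1 := by
  induction xs with
  | nil => simp
  | cons c t ih =>
    by_cases hc : c = 1
    · simpa [hc] using ih
    · simp [hc]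

-- a line starting with 1 splits into its initial run of 1s and a remainder not starting with 1
theorem pvRunSplit (t : List Int) : ∃ (k : Nat) (r : List Int),
    1 ≤ k ∧ (1 : Int) :: t = List.replicate k 1 ++ r ∧ r.getD 0 0 ≠ 1 ∧
    r.length + k = t.length + 1 := by
  refine ⟨(((1 : Int) :: t).takeWhile (fun x => decide (x = 1))).length,
    ((1 : Int) :: t).dropWhile (fun x => decide (x = 1)), ?_, ?_, pvDropWhile_head _, ?_⟩
  · rw [List.takeWhile_cons_of_pos (by simp)]
    simp
  · conv_lhs => rw [← List.takeWhile_append_dropWhile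
      (p := fun x => decide (x = 1)) (l := (1 : Int) :: t)]
    congr 1
    apply List.eq_replicate_of_mem
    intro b hb
    have := List.mem_takeWhile_imp hb
    simpa using this
  · have h := congrArg List.length
      (List.takeWhile_append_dropWhile (p := fun x => decide (x = 1)) (l := (1 : Int) :: t))
    simp only [List.length_append, List.length_cons] at h
    omega

theorem pvMain : ∀ (n : Nat) (xs : List Int) (prev : Int), xs.length ≤ n → prev ≠ 1 →
    pvZipF (pvSfil prev xs) (pvEndsB xs) = pvG 0 xs := by
  intro n
  induction n with
  | zero =>
    intro xs prev hlen _
    have : xs = [] := List.length_eq_zero_iff.mp (by omega)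
    subst this
    simp [pvSfil, pvEndsB, pvZipF, pvG]
  | succ n ih =>
    intro xs prev hlen hp
    cases xs with
    | nil => simp [pvSfil, pvEndsB, pvZipF, pvG]
    | cons c t =>
      simp only [List.length_cons] at hlen
      by_cases hc : c = 1
      · -- head of a run: peel the whole initial run of 1s at once
        subst hc
        obtain ⟨k, r, hk1, hdec, hr, hrlen⟩ := pvRunSplit t
        rw [hdec, pvSfil_start prev k r hp hk1, pvEndsB_rep k r hr hk1, pvG_rep]
        have hz : pvZipF (0 :: (pvSfil 1 r).map (· + k)) ((k - 1) :: (pvEndsB r).map (· + k))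
            = (((k - 1 : Nat) : Int) - ((0 : Nat) : Int) + 1)
                :: pvZipF (pvSfil 1 r) (pvEndsB r) := by
          have hs := pvZipF_shift (pvSfil 1 r) (pvEndsB r) k
          unfold pvZipF at hs ⊢
          rw [List.zip_cons_cons, List.map_cons, hs]
        rw [hz]
        have hhead : (((k - 1 : Nat) : Int) - ((0 : Nat) : Int) + 1) = (k : Int) := by
          rw [Nat.cast_sub hk1]
          push_cast
          ring
        rw [hhead, zero_add]
        cases r with
        | nil =>
          simp only [pvSfil, pvEndsB, pvZipF, List.length_nil, List.range_zero,
            List.filter_nil, List.zip_nil_left, List.map_nil]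
          rw [pvG, if_pos (by omega)]
        | cons a t' =>
          have ha : a ≠ 1 := by simpa using hr
          have htail : pvZipF (pvSfil a (a :: t')) (pvEndsB (a :: t')) = pvG 0 (a :: t') := by
            apply ih (a :: t') a _ ha
            simp only [List.length_cons] at hrlen ⊢
            omega
          rw [pvSfil_irrel 1 a (a :: t') (by simpa using ha), htail]
          have h2 : pvG 0 (a :: t') = pvG 0 t' := by
            rw [pvG, if_neg ha, if_neg (by norm_num)]
          have h3 : pvG ((k : Nat) : Int) (a :: t') = (k : Int) :: pvG 0 t' := by
            rw [pvG, if_neg ha, if_pos (by omega)]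
          rw [h2, h3]
      · -- head is not a 1: both sides just shift past it
        rw [pvSfil_cons, pvEndsB_cons, if_neg (by tauto), if_neg (by tauto)]
        simp only [List.nil_append]
        rw [pvZipF_shift (pvSfil c t) (pvEndsB t) 1]
        rw [ih t c (by omega) hc]
        rw [pvG, if_neg hc, if_neg (by norm_num)]

theorem clue_lemma (xs : List Int) : pvCalcClues xs = pvCluesB xs := by
  rw [pvCalc_eq_g]
  unfold pvCluesB
  rw [pvStartsB_eq_sfil]
  exact (pvMain xs.length xs 0 le_rfl (by norm_num)).symm

theorem pvZipStar_eq (m : Nat) : ∀ (rows : List (List Int)),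
    rows ≠ [] → (∀ r ∈ rows, m ≤ r.length) → (∃ r ∈ rows, r.length = m) →
    pvZipStar rows = (List.range m).map (fun col => rows.map (fun r => r.getD col 0)) := by
  induction m with
  | zero =>
    intro rows hne hall hex
    obtain ⟨r, hr, hr0⟩ := hex
    rw [pvZipStar]
    rw [dif_pos]
    · simp
    · right
      simp only [List.any_eq_true]
      exact ⟨r, hr, by simpa [List.isEmpty_iff] using List.length_eq_zero_iff.mp hr0⟩
  | succ m ih =>
    intro rows hne hall hex
    rw [pvZipStar, dif_neg]
    · rw [ih (rows.map (fun r => r.tail))]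
      · rw [List.range_succ_eq_map]
        simp only [List.map_cons, List.map_map]
        congr 1
        · apply List.map_congr_left
          intro r _
          cases r <;> simp
        · apply List.map_congr_left
          intro col _
          simp only [Function.comp_apply]
          apply List.map_congr_left
          intro r _
          cases r <;> simp
      · simpa using hne
      · intro t ht
        simp only [List.mem_map] at ht
        obtain ⟨r, hr, rfl⟩ := ht
        have := hall r hr
        simp [List.length_tail]
        omega
      · obtain ⟨r, hr, hrm⟩ := hex
        exact ⟨r.tail, List.mem_map_of_mem hr, by simp [List.length_tail, hrm]⟩
    · rw [not_or]
      refine ⟨by simpa [List.isEmpty_iff] using hne, ?_⟩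
      simp only [List.any_eq_true]
      rintro ⟨r, hr, hre⟩
      have := hall r hr
      rw [List.isEmpty_iff] at hre
      simp [hre] at this

theorem pvRangeMap (x : Nat) (f : Int → List Int) :
    (PySem.List.pyRange 0 (x : Int) 1).map f = (List.range x).map (fun k : Nat => f (k : Int)) := by
  rw [PySem.List.pyRange_one, List.map_map]
  simp only [Int.sub_zero, Int.toNat_natCast]
  apply List.map_congr_left
  intro k _
  simp

-- ===== VERDICT (by name: the statement is the Claim_ definition above) =====
theorem get_clues_from_grid_spec : Claim_equal_get_clues_from_grid := by
  intro grid _ hpre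
  obtain ⟨hne, hall⟩ := hpre
  unfold Spec_get_clues_from_grid get_clues_from_grid get_clues_from_grid_alt
  simp only []
  have hx : ((PySem.List.pyGet? grid 0).getD []) = grid.headD [] := by
    rw [PySem.List.pyGet?_zero]
    cases grid with
    | nil => rfl
    | cons r rs => rfl
  rw [hx]
  congr 1
  · apply List.map_congr_left
    intro r _
    exact clue_lemma r
  -- columns
  congr 1
  have hcol : ∀ col : Int,
      (PySem.List.pyRange 0 (grid.length : Int) 1).map
        (fun row => PySem.List.pyGetD (PySem.List.pyGetD grid row []) col 0)
      = grid.map (fun r => PySem.List.pyGetD r col 0) := by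
    intro col
    have h1 := PySem.List.map_pyGetD_pyRange_zero' grid ([] : List Int)
    calc (PySem.List.pyRange 0 (grid.length : Int) 1).map
          (fun row => PySem.List.pyGetD (PySem.List.pyGetD grid row []) col 0)
        = ((PySem.List.pyRange 0 (grid.length : Int) 1).map
            (fun row => PySem.List.pyGetD grid row [])).map
            (fun r => PySem.List.pyGetD r col 0) := by rw [List.map_map]; rfl
      _ = grid.map (fun r => PySem.List.pyGetD r col 0) := by rw [h1]
  calc (PySem.List.pyRange 0 ((grid.headD []).length : Int) 1).map (fun col =>
          pvCalcClues ((PySem.List.pyRange 0 (grid.length : Int) 1).map (fun row =>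
            PySem.List.pyGetD (PySem.List.pyGetD grid row []) col 0)))
      = (List.range (grid.headD []).length).map (fun k : Nat =>
          pvCalcClues (grid.map (fun r => PySem.List.pyGetD r (k : Int) 0))) := by
        rw [pvRangeMap]
        apply List.map_congr_left
        intro k _
        rw [hcol]
    _ = (List.range (grid.headD []).length).map (fun k : Nat =>
          pvCluesB (grid.map (fun r => r.getD k 0))) := by
        apply List.map_congr_left
        intro k _
        rw [clue_lemma]
        congr 1
        apply List.map_congr_left
        intro r _
        simp
    _ = (pvZipStar grid).map (fun col => pvCluesB col) := by
        rw [pvZipStar_eq (grid.headD []).length grid hne hall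
          ⟨grid.headD [], by cases grid with | nil => exact absurd rfl hne | cons r rs => simp, rfl⟩]
        rw [List.map_map]
        rfl
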